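-- pv_equiv track=rewrite | github.com/DocInTardis/writing-agent | writing_agent/web/html_sanitize.py | _filter_class
-- ===== SOURCE A (Python) =====
-- def _filter_class(value: str) -> str:
--     raw = (value or "").strip()
--     if not raw:
--         return ""
--     # Keep simple safe class list: letters/numbers/_- and spaces.
--     cleaned = []
--     for part in raw.split():
--         p = "".join(ch for ch in part if ch.isalnum() or ch in {"_", "-"})
--         if p:
--             cleaned.append(p)
--     out = " ".join(cleaned)[:80]
--     return out
-- ===== SOURCE B (Python) =====
-- def _filter_class(value: str) -> str:
--     words = []
--     cur = []
--     for ch in (value or ""):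
--         if ch.isspace():
--             if cur:
--                 words.append("".join(cur))
--                 cur = []
--         elif ch.isalnum() or ch in "_-":
--             cur.append(ch)
--         # any other character is dropped without ending the current token
--     if cur:
--         words.append("".join(cur))
--     return " ".join(words)[:80]
-- ===== Notes on version B (the rewrite author's own statement) =====
-- stated objective: alternative
-- what changed: Replaced A's strip/split()/per-word-filter/join pipeline with a single left-to-right scan that keeps a current-token buffer, flushes it to the word list on whitespace, and drops other disallowed characters in place.
import Mathlib
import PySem

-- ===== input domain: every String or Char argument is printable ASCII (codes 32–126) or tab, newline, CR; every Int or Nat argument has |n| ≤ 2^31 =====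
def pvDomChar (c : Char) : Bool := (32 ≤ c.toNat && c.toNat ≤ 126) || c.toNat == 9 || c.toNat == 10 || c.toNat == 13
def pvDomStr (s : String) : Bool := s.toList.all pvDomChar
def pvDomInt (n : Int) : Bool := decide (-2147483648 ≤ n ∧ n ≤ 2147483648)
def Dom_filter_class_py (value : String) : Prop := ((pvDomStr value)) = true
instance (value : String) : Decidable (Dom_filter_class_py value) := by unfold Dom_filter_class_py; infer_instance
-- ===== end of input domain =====

-- B replaces A's strip/split/per-word-filter/join pipeline by a single left-to-right scan
-- maintaining a current-token buffer and a word list (objective: alternative decomposition, same cost).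

-- the shared character predicate: ch.isalnum() or ch in {"_", "-"}
def pvKeep (c : Char) : Bool := PySem.Chars.isalnum c || c == '_' || c == '-'

-- ===== PORT A =====
-- the 'for part in raw.split(): …' loop accumulating `cleaned`
def pvCleanLoop (parts : List (List Char)) (cleaned : List (List Char)) : List (List Char) :=
  parts.foldl (fun cleaned part =>
    let p := part.filter pvKeep
    if p = [] then cleaned else cleaned ++ [p]) cleaned

def pvACore (v : List Char) : List Char :=
  let raw := PySem.Chars.strip v
  if raw = [] then []
  else
    let cleaned := pvCleanLoop (PySem.Chars.split₀ raw) []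
    PySem.Chars.slice (PySem.Chars.join [' '] cleaned) none (some 80)

def filter_class_py (value : String) : String :=
  String.ofList (pvACore value.toList)

-- ===== PORT B =====
-- one step of Source B's scan: state = (words, cur)
def pvStep (st : List (List Char) × List Char) (ch : Char) : List (List Char) × List Char :=
  if PySem.Chars.isspace ch then
    if st.2 = [] then st else (st.1 ++ [st.2], [])
  else if pvKeep ch then (st.1, st.2 ++ [ch])
  else st

def pvBCore (v : List Char) : List Char :=
  let st := v.foldl pvStep ([], [])
  let words := if st.2 = [] then st.1 else st.1 ++ [st.2]
  (PySem.Chars.join [' '] words).take 80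

def filter_class_py_alt (value : String) : String :=
  String.ofList (pvBCore value.toList)

-- ===== PRECONDITION & SPEC =====
def Spec_filter_class_py (value : String) (out : String) : Prop := out = filter_class_py_alt value
instance (value : String) (out : String) : Decidable (Spec_filter_class_py value out) := by unfold Spec_filter_class_py; infer_instance

-- ===== CLAIM (what is proved, stated in full; the proofs are below) =====
def Claim_equal_filter_class_py : Prop := ∀ (value : String), Dom_filter_class_py value → Spec_filter_class_py value (filter_class_py value)

-- ===== LEMMAS AND PROOFS =====

-- the common value both pipelines compute: filtered nonempty words
def pvClean : List (List Char) → List (List Char)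
  | [] => []
  | p :: ps => if p.filter pvKeep = [] then pvClean ps else p.filter pvKeep :: pvClean ps

-- finalize Source B's scan state (the trailing flush)
def pvFin (st : List (List Char) × List Char) : List (List Char) :=
  if st.2 = [] then st.1 else st.1 ++ [st.2]

theorem pvClean_append (a b : List (List Char)) : pvClean (a ++ b) = pvClean a ++ pvClean b := by
  induction a with
  | nil => rfl
  | cons p ps ih =>
    rw [List.cons_append]
    simp only [pvClean]
    by_cases h : p.filter pvKeep = [] <;> simp [h, ih]

theorem pvCleanLoop_eq (parts : List (List Char)) :
    ∀ acc, pvCleanLoop parts acc = acc ++ pvClean parts := by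
  induction parts with
  | nil => intro acc; simp [pvCleanLoop, pvClean]
  | cons p ps ih =>
    intro acc
    have hstep : pvCleanLoop (p :: ps) acc =
        pvCleanLoop ps (if p.filter pvKeep = [] then acc else acc ++ [p.filter pvKeep]) := rfl
    rw [hstep, ih]
    by_cases h : p.filter pvKeep = [] <;> simp [pvClean, h]

theorem go_nil (cur : List Char) (acc : List (List Char)) :
    PySem.Chars.split₀.go [] cur acc =
      if cur = [] then acc.reverse else (cur.reverse :: acc).reverse := by
  simp [PySem.Chars.split₀.go]

theorem go_cons (c : Char) (s cur : List Char) (acc : List (List Char)) :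
    PySem.Chars.split₀.go (c :: s) cur acc =
      if PySem.Chars.isspace c then
        (if cur = [] then PySem.Chars.split₀.go s [] acc
         else PySem.Chars.split₀.go s [] (cur.reverse :: acc))
      else PySem.Chars.split₀.go s (c :: cur) acc := by
  simp [PySem.Chars.split₀.go]

-- evaluation rules for one scan step
theorem pvStep_space (W : List (List Char)) (F : List Char) (c : Char)
    (hsp : PySem.Chars.isspace c = true) :
    pvStep (W, F) c = if F = [] then (W, F) else (W ++ [F], []) := by
  unfold pvStep; rw [if_pos hsp]

theorem pvStep_keep (W : List (List Char)) (F : List Char) (c : Char)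
    (hsp : ¬ PySem.Chars.isspace c = true) (hk : pvKeep c = true) :
    pvStep (W, F) c = (W, F ++ [c]) := by
  unfold pvStep; rw [if_neg hsp, if_pos hk]

theorem pvStep_other (W : List (List Char)) (F : List Char) (c : Char)
    (hsp : ¬ PySem.Chars.isspace c = true) (hk : ¬ pvKeep c = true) :
    pvStep (W, F) c = (W, F) := by
  unfold pvStep; rw [if_neg hsp, if_neg hk]

theorem pvFin_mk (W : List (List Char)) (F : List Char) :
    pvFin (W, F) = W ++ (if F = [] then [] else [F]) := by
  unfold pvFin
  by_cases hF : F = []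
  · rw [if_pos hF, if_pos hF, List.append_nil]
  · rw [if_neg hF, if_neg hF]

theorem pvClean_one (x : List Char) :
    pvClean [x] = if x.filter pvKeep = [] then [] else [x.filter pvKeep] := by
  simp only [pvClean]

-- the scan, started from the state corresponding to go's accumulators, computes pvClean of go
theorem go_scan (s : List Char) :
    ∀ (rcur : List Char) (racc : List (List Char)),
      pvFin (s.foldl pvStep (pvClean racc.reverse, rcur.reverse.filter pvKeep)) =
        pvClean (PySem.Chars.split₀.go s rcur racc) := by
  induction s with
  | nil =>
    intro rcur racc
    rw [go_nil]
    by_cases h : rcur = []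
    · simp [h, pvFin]
    · rw [if_neg h, List.reverse_cons, pvClean_append, List.foldl_nil, pvFin_mk, pvClean_one]
  | cons c s ih =>
    intro rcur racc
    rw [go_cons]
    by_cases hsp : PySem.Chars.isspace c = true
    · rw [if_pos hsp]
      by_cases h : rcur = []
      · rw [if_pos h]
        simp only [h, List.reverse_nil, List.filter_nil]
        rw [List.foldl_cons, pvStep_space _ _ _ hsp, if_pos rfl]
        simpa using ih [] racc
      · rw [if_neg h]
        have hrec := ih [] (rcur.reverse :: racc)
        rw [List.reverse_cons, pvClean_append, pvClean_one] at hrec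
        simp only [List.reverse_nil, List.filter_nil] at hrec
        rw [← hrec, List.foldl_cons, pvStep_space _ _ _ hsp]
        by_cases hp : rcur.reverse.filter pvKeep = []
        · rw [if_pos hp, if_pos hp, hp, List.append_nil]
        · rw [if_neg hp, if_neg hp]
    · rw [if_neg hsp]
      have hrec := ih (c :: rcur) racc
      rw [List.reverse_cons, List.filter_append, List.filter_singleton] at hrec
      rw [← hrec, List.foldl_cons]
      by_cases hk : pvKeep c = true
      · simp only [hk, cond_true]
        rw [pvStep_keep _ _ _ hsp hk]
      · have hkf : pvKeep c = false := by revert hk; cases pvKeep c <;> simp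
        simp only [hkf, cond_false, List.append_nil]
        rw [pvStep_other _ _ _ hsp hk]

theorem scan_eq_clean_split₀ (v : List Char) :
    pvFin (v.foldl pvStep ([], [])) = pvClean (PySem.Chars.split₀ v) := by
  have := go_scan v [] []
  simpa [pvClean, PySem.Chars.split₀] using this

-- go ignores a fully-whitespace input
theorem go_all_space (ws : List Char) :
    ∀ (rcur : List Char) (racc : List (List Char)),
      (∀ c ∈ ws, PySem.Chars.isspace c = true) →
      PySem.Chars.split₀.go ws rcur racc = PySem.Chars.split₀.go [] rcur racc := by
  induction ws with
  | nil => intro _ _ _; rfl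
  | cons c ws ih =>
    intro rcur racc hall
    have hc : PySem.Chars.isspace c = true := hall c (by simp)
    have hrest : ∀ d ∈ ws, PySem.Chars.isspace d = true := fun d hd => hall d (by simp [hd])
    rw [go_cons, if_pos hc]
    by_cases h : rcur = []
    · rw [if_pos h, ih [] racc hrest, go_nil, go_nil]; simp [h]
    · rw [if_neg h, ih [] (rcur.reverse :: racc) hrest, go_nil, go_nil]; simp [h]

-- go ignores a fully-whitespace suffix
theorem go_append_space (s : List Char) :
    ∀ (ws rcur : List Char) (racc : List (List Char)),
      (∀ c ∈ ws, PySem.Chars.isspace c = true) →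
      PySem.Chars.split₀.go (s ++ ws) rcur racc = PySem.Chars.split₀.go s rcur racc := by
  induction s with
  | nil => intro ws rcur racc hall; simpa using go_all_space ws rcur racc hall
  | cons c s ih =>
    intro ws rcur racc hall
    rw [List.cons_append, go_cons, go_cons]
    by_cases hsp : PySem.Chars.isspace c
    · by_cases h : rcur = [] <;> simp [hsp, h, ih ws _ _ hall]
    · simp [hsp, ih ws _ _ hall]

-- go from an empty current token ignores a leading whitespace run
theorem go_dropWhile (s : List Char) :
    ∀ racc, PySem.Chars.split₀.go (s.dropWhile PySem.Chars.isspace) [] racc =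
      PySem.Chars.split₀.go s [] racc := by
  induction s with
  | nil => intro _; rfl
  | cons c s ih =>
    intro racc
    by_cases hsp : PySem.Chars.isspace c
    · rw [List.dropWhile_cons_of_pos hsp, ih racc, go_cons]; simp [hsp]
    · rw [List.dropWhile_cons_of_neg (by simp [hsp])]

theorem split₀_strip (v : List Char) :
    PySem.Chars.split₀ (PySem.Chars.strip v) = PySem.Chars.split₀ v := by
  have hl : PySem.Chars.lstrip v = v.dropWhile PySem.Chars.isspace := by
    simp [PySem.Chars.lstrip]
  have hr : ∀ u : List Char,
      PySem.Chars.rstrip u = (u.reverse.dropWhile PySem.Chars.isspace).reverse := by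
    intro u; simp [PySem.Chars.rstrip]
  set L := v.dropWhile PySem.Chars.isspace with hL
  have hdecomp : L = (L.reverse.dropWhile PySem.Chars.isspace).reverse ++
      (L.reverse.takeWhile PySem.Chars.isspace).reverse := by
    have h1 : L.reverse = L.reverse.takeWhile PySem.Chars.isspace ++
        L.reverse.dropWhile PySem.Chars.isspace :=
      (List.takeWhile_append_dropWhile).symm
    calc L = L.reverse.reverse := (List.reverse_reverse L).symm
      _ = (L.reverse.takeWhile PySem.Chars.isspace ++
            L.reverse.dropWhile PySem.Chars.isspace).reverse := by rw [← h1]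
      _ = (L.reverse.dropWhile PySem.Chars.isspace).reverse ++
            (L.reverse.takeWhile PySem.Chars.isspace).reverse := List.reverse_append
  have hws : ∀ c ∈ (L.reverse.takeWhile PySem.Chars.isspace).reverse,
      PySem.Chars.isspace c = true := by
    intro c hc
    exact List.mem_takeWhile_imp (List.mem_reverse.mp hc)
  calc PySem.Chars.split₀ (PySem.Chars.strip v)
      = PySem.Chars.split₀.go (L.reverse.dropWhile PySem.Chars.isspace).reverse [] [] := by
        simp [PySem.Chars.split₀, PySem.Chars.strip, hl, hr]
    _ = PySem.Chars.split₀.go L [] [] := by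
        conv_rhs => rw [hdecomp]
        rw [go_append_space _ _ _ _ hws]
    _ = PySem.Chars.split₀ v := by
        rw [hL, go_dropWhile]
        rfl

theorem pvCore_eq (v : List Char) : pvACore v = pvBCore v := by
  unfold pvACore pvBCore
  dsimp only
  rw [show ∀ st : List (List Char) × List Char,
        (if st.2 = [] then st.1 else st.1 ++ [st.2]) = pvFin st from fun _ => rfl,
      scan_eq_clean_split₀]
  by_cases h : PySem.Chars.strip v = []
  · rw [if_pos h]
    have h0 : PySem.Chars.split₀ v = [] := by rw [← split₀_strip v, h]; rfl
    rw [h0]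
    rfl
  · rw [if_neg h, pvCleanLoop_eq, split₀_strip, List.nil_append,
      PySem.Chars.slice_eq_listSlice]
    simp [pysem]

-- ===== VERDICT (by name: the statement is the Claim_ definition above) =====
theorem filter_class_py_spec : Claim_equal_filter_class_py := by
  intro value _
  unfold Spec_filter_class_py filter_class_py filter_class_py_alt
  rw [pvCore_eq]
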